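-- pv_equiv track=rewrite | github.com/IvanPermyakovDev/news_structurizer | segmentation/metrics.py | _segment_ids
-- ===== SOURCE A (Python) =====
-- from typing import Dict, List, Sequence, Tuple
--
-- def _segment_ids(boundaries: Sequence[int], total_units: int) -> List[int]:
--     ids: List[int] = []
--     current = 0
--     boundary_set = set(boundaries)
--     for idx in range(total_units):
--         ids.append(current)
--         if idx in boundary_set:
--             current += 1
--     return ids
-- ===== SOURCE B (Python) =====
-- def _segment_ids(boundaries, total_units):
--     ids = []
--     bs = sorted(b for b in set(boundaries) if 0 <= b < total_units)
--     start = 0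
--     seg = 0
--     for b in bs:
--         ids.extend([seg] * (b + 1 - start))
--         start = b + 1
--         seg += 1
--     ids.extend([seg] * (total_units - start))
--     return ids
-- ===== Notes on version B (the rewrite author's own statement) =====
-- stated objective: alternative
-- what changed: Instead of testing set membership for every unit index, B sorts the distinct in-range boundaries once and emits constant-id runs between consecutive boundaries.
import Mathlib
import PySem

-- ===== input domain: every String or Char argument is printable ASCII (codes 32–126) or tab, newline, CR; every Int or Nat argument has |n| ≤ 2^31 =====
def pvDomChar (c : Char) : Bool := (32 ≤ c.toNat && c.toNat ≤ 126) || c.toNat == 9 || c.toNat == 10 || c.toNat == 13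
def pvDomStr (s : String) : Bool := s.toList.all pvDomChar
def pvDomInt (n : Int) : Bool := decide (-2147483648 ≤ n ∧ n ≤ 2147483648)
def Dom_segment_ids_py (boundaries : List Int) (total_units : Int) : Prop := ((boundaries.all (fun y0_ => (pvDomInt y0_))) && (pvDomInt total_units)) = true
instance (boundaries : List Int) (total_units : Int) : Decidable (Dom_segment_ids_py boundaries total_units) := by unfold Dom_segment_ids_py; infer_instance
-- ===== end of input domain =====

-- B replaces the per-unit membership test with one sort of the distinct in-range
-- boundaries followed by emitting constant-id runs between consecutive boundaries.

-- ===== PORT A =====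
def segment_ids_py (boundaries : List Int) (total_units : Int) : List Int :=
  let boundary_set := PySem.Set.ofList boundaries
  ((PySem.List.pyRange 0 total_units 1).foldl
      (fun (st : List Int × Int) idx =>
        (st.1 ++ [st.2], if PySem.Set.contains boundary_set idx then st.2 + 1 else st.2))
      ([], 0)).1

-- ===== PORT B =====
def segment_ids_py_alt (boundaries : List Int) (total_units : Int) : List Int :=
  let bs := PySem.List.sorted
      ((PySem.Set.ofList boundaries).filter
        (fun b => decide (0 ≤ b) && decide (b < total_units)))
      (fun x => x) false
  let st := bs.foldl
      (fun (st : List Int × Int × Int) b =>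
        (st.1 ++ List.replicate (b + 1 - st.2.1).toNat st.2.2, b + 1, st.2.2 + 1))
      ([], 0, 0)
  st.1 ++ List.replicate (total_units - st.2.1).toNat st.2.2

-- ===== PRECONDITION & SPEC =====
def Spec_segment_ids_py (boundaries : List Int) (total_units : Int) (out : List Int) : Prop := out = segment_ids_py_alt boundaries total_units
instance (boundaries : List Int) (total_units : Int) (out : List Int) : Decidable (Spec_segment_ids_py boundaries total_units out) := by unfold Spec_segment_ids_py; infer_instance

-- ===== CLAIM (what is proved, stated in full; the proofs are below) =====
def Claim_equal_segment_ids_py : Prop := ∀ (boundaries : List Int) (total_units : Int), Dom_segment_ids_py boundaries total_units → Spec_segment_ids_py boundaries total_units (segment_ids_py boundaries total_units)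

-- ===== LEMMAS AND PROOFS =====

-- number of distinct boundary values b with 0 ≤ b < i
def pvCnt (boundaries : List Int) (i : Int) : Int :=
  ((PySem.Set.ofList boundaries).countP (fun b => decide (0 ≤ b ∧ b < i)) : Int)

-- splitting a strict-upper-bound count at k, for a Nodup list
lemma countP_split (l : List Int) (hl : l.Nodup) (k : Int) (hk : 0 ≤ k) :
    l.countP (fun b => decide (0 ≤ b ∧ b < k + 1)) =
      l.countP (fun b => decide (0 ≤ b ∧ b < k)) + (if k ∈ l then 1 else 0) := by
  induction l with
  | nil => simp
  | cons a l ih =>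
    rcases List.nodup_cons.mp hl with ⟨ha, hl'⟩
    by_cases hak : a = k
    · subst hak
      have hcongr : l.countP (fun b => decide (0 ≤ b ∧ b < a + 1)) =
          l.countP (fun b => decide (0 ≤ b ∧ b < a)) := by
        apply List.countP_congr
        intro b hb
        have hne : b ≠ a := fun h => ha (h ▸ hb)
        simp only [decide_eq_true_eq]
        omega
      have hpt : (decide (0 ≤ a ∧ a < a + 1) : Bool) = true := by
        simp only [decide_eq_true_eq]; omega
      have hpf : (decide (0 ≤ a ∧ a < a) : Bool) = false := by
        simp only [decide_eq_false_iff_not]; omega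
      rw [List.countP_cons, List.countP_cons, hcongr, hpt, hpf,
        if_pos (List.mem_cons_self ..)]
      simp
    · have hmem : (k ∈ a :: l) ↔ (k ∈ l) := by
        rw [List.mem_cons]
        exact or_iff_right (fun h => hak h.symm)
      have h1 : (decide (0 ≤ a ∧ a < k + 1) : Bool) = decide (0 ≤ a ∧ a < k) := by
        simp only [decide_eq_decide]; omega
      rw [List.countP_cons, List.countP_cons, ih hl', h1, if_congr hmem rfl rfl]
      ring

-- A's loop over range(n) yields the prefix-count map and the final count
lemma foldA (boundaries : List Int) (n : Nat) :
    ((List.range n).map (fun k : Nat => (k : Int))).foldl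
        (fun (st : List Int × Int) idx =>
          (st.1 ++ [st.2],
            if PySem.Set.contains (PySem.Set.ofList boundaries) idx then st.2 + 1 else st.2))
        ([], 0)
      = ((List.range n).map (fun i : Nat => pvCnt boundaries (i : Int)), pvCnt boundaries (n : Int)) := by
  induction n with
  | zero =>
    have hz : (PySem.Set.ofList boundaries).countP (fun b => decide (0 ≤ b) && decide (b < (0 : Int))) = 0 := by
      rw [List.countP_eq_zero]
      intro x _
      simp only [Bool.and_eq_true, decide_eq_true_eq, not_and]
      omega
    simp [pvCnt, hz]
  | succ n ih =>
    have hc : (PySem.Set.contains (PySem.Set.ofList boundaries) (n : Int) = true) ↔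
        ((n : Int) ∈ PySem.Set.ofList boundaries) := PySem.Set.contains_iff _ _
    have hsplit : pvCnt boundaries ((n : Int) + 1) =
        pvCnt boundaries (n : Int) +
          (if (n : Int) ∈ PySem.Set.ofList boundaries then 1 else 0) := by
      unfold pvCnt
      rw [countP_split _ (PySem.Set.nodup_ofList boundaries) (n : Int) (by positivity)]
      push_cast
      ring
    simp only [List.range_succ, List.map_append, List.foldl_append, ih, List.map_cons,
      List.map_nil, List.foldl_cons, List.foldl_nil, Prod.mk.injEq]
    refine ⟨trivial, ?_⟩
    push_cast at hsplit ⊢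
    rw [hsplit, if_congr hc rfl rfl]
    split <;> omega

-- splitting a mapped range at n
lemma range_map_split (n m : Nat) (f : Nat → Int) :
    (List.range (n + m)).map f =
      (List.range n).map f ++ (List.range m).map (fun i => f (n + i)) := by
  rw [List.range_add, List.map_append, List.map_map]
  rfl

-- B's run-fill loop yields the same map, for a strictly increasing bs bounded in [start, t)
lemma foldB (t : Int) (bs : List Int) : ∀ (start seg : Int) (acc : List Int),
    (∀ b ∈ bs, start ≤ b ∧ b < t) → bs.Pairwise (· < ·) →
    (let st := bs.foldl
        (fun (st : List Int × Int × Int) b =>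
          (st.1 ++ List.replicate (b + 1 - st.2.1).toNat st.2.2, b + 1, st.2.2 + 1))
        (acc, start, seg)
     st.1 ++ List.replicate (t - st.2.1).toNat st.2.2)
    = acc ++ (List.range (t - start).toNat).map
        (fun j : Nat => seg + (bs.countP (fun b => decide (b < start + (j : Int))) : Int)) := by
  induction bs with
  | nil =>
    intro start seg acc _ _
    simp [List.map_const']
  | cons b bs ih =>
    intro start seg acc hbd hpw
    rcases hbd b (by simp) with ⟨hsb, hbt⟩
    have hbs_bd : ∀ x ∈ bs, b + 1 ≤ x ∧ x < t := by
      intro x hx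
      rcases hbd x (by simp [hx]) with ⟨_, hxt⟩
      have := (List.pairwise_cons.mp hpw).1 x hx
      exact ⟨by omega, hxt⟩
    have hpw' := (List.pairwise_cons.mp hpw).2
    simp only [List.foldl_cons]
    rw [ih (b + 1) (seg + 1) (acc ++ List.replicate (b + 1 - start).toNat seg) hbs_bd hpw']
    rw [List.append_assoc]
    congr 1
    -- split range (t-start) at k = (b+1-start)
    have hk : (t - start).toNat = (b + 1 - start).toNat + (t - (b + 1)).toNat := by omega
    rw [hk, range_map_split]
    congr 1
    · -- first block: constant seg
      have : ∀ j ∈ List.range (b + 1 - start).toNat,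
          seg + (((b :: bs).countP (fun x => decide (x < start + (j : Int)))) : Int) = seg := by
        intro j hj
        have hj' : (j : Int) < b + 1 - start := by
          have := List.mem_range.mp hj; omega
        have hz : (b :: bs).countP (fun x => decide (x < start + (j : Int))) = 0 := by
          rw [List.countP_eq_zero]
          intro x hx
          rcases List.mem_cons.mp hx with h | h
          · subst h; simp; omega
          · rcases hbs_bd x h with ⟨hx1, _⟩
            simp; omega
        rw [hz]; push_cast; ring
      rw [List.map_congr_left this, List.map_const']
      simp
    · -- second block: shift by k
      apply List.map_congr_left
      intro j hj
      have hks : (start : Int) + ((b + 1 - start).toNat + (j : Int)) = b + 1 + (j : Int) := by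
        omega
      push_cast
      rw [hks]
      have hc : (b :: bs).countP (fun x => decide (x < b + 1 + (j : Int))) =
          1 + bs.countP (fun x => decide (x < b + 1 + (j : Int))) := by
        rw [List.countP_cons]
        have : (decide (b < b + 1 + (j : Int)) : Bool) = true := by
          simp; omega
        simp [this]; omega
      rw [hc]; push_cast; ring

theorem segment_ids_py_spec : Claim_equal_segment_ids_py := by
  intro boundaries t _
  unfold Spec_segment_ids_py
  simp only [segment_ids_py, segment_ids_py_alt]
  -- A side
  have hr : PySem.List.pyRange 0 t 1 = (List.range (t).toNat).map (fun k : Nat => (k : Int)) := by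
    rw [PySem.List.pyRange_one]
    simp
  rw [hr, foldA boundaries t.toNat]
  -- B side
  set F := (PySem.Set.ofList boundaries).filter
      (fun b => decide (0 ≤ b) && decide (b < t)) with hF
  set bs := PySem.List.sorted F (fun x => x) false with hbs
  have hperm : bs.Perm F := PySem.List.sorted_perm F (fun x => x) false
  have hFnodup : F.Nodup := (PySem.Set.nodup_ofList boundaries).filter _
  have hnodup : bs.Nodup := hperm.nodup_iff.mpr hFnodup
  have hle : bs.Pairwise (fun a b => a ≤ b) := PySem.List.sorted_pairwise F (fun x => x)
  have hlt : bs.Pairwise (· < ·) := by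
    have := List.Pairwise.and hle hnodup
    exact this.imp (fun h => lt_of_le_of_ne h.1 h.2)
  have hbd : ∀ b ∈ bs, (0 : Int) ≤ b ∧ b < t := by
    intro b hb
    have : b ∈ F := (PySem.List.mem_sorted ..).mp hb
    rw [hF, List.mem_filter] at this
    simpa using this.2
  rw [foldB t bs 0 0 [] hbd hlt]
  simp only [List.nil_append, sub_zero]
  apply List.map_congr_left
  intro j hj
  have hjt : (j : Int) < t := by
    have := List.mem_range.mp hj; omega
  have hcnt : bs.countP (fun b => decide (b < 0 + (j : Int))) =
      (PySem.Set.ofList boundaries).countP (fun b => decide (0 ≤ b ∧ b < (j : Int))) := by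
    rw [hperm.countP_eq, hF, List.countP_filter]
    apply List.countP_congr
    intro b _
    simp only [Bool.and_eq_true, decide_eq_true_eq]
    constructor
    · rintro ⟨h1, h2, _⟩; omega
    · rintro ⟨h1, h2⟩; exact ⟨by omega, h1, by omega⟩
  rw [hcnt]
  unfold pvCnt
  ring
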